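-- pv_equiv track=rewrite | github.com/DoubleG254/Mini-Bi-App | backend/mini_bi_app/ai_pipeline/generate_data.py | extract_name_features
-- ===== SOURCE A (Python) =====
-- def extract_name_features(col_name):
--     """Extracts binary features from column name."""
--     name_lower = col_name.lower()
--
--     # Geographic keywords
--     geo_keywords = ['region', 'country', 'city', 'state', 'location']
--     has_geo_keywords = 1 if any(kw in name_lower for kw in geo_keywords) else 0
--
--     # Category keywords
--     cat_keywords = ['category', 'type', 'status', 'group', 'class']
--     has_cat_keywords = 1 if any(kw in name_lower for kw in cat_keywords) else 0
--
--     return {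
--         'has_cost': 1 if 'cost' in name_lower or 'price' in name_lower or 'expense' in name_lower else 0,
--         'has_revenue': 1 if 'revenue' in name_lower or 'income' in name_lower or 'profit' in name_lower else 0,
--         'has_id': 1 if 'id' in name_lower or 'code' in name_lower or 'uuid' in name_lower else 0,
--         'has_date': 1 if 'date' in name_lower or 'time' in name_lower or 'year' in name_lower or 'month' in name_lower else 0,
--         'has_ratio': 1 if 'rate' in name_lower or 'ratio' in name_lower or 'percent' in name_lower else 0,
--         'has_score': 1 if 'score' in name_lower or 'rating' in name_lower or 'index' in name_lower else 0,
--         'has_bound': 1 if 'low' in name_lower or 'high' in name_lower or 'mid' in name_lower or 'bound' in name_lower else 0,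
--         'has_reg': 1 if 'regression' in name_lower or 'coef' in name_lower or 'beta' in name_lower else 0,
--         'is_unnamed': 1 if 'unnamed' in name_lower or 'col_' in name_lower else 0,
--         'has_geo_keywords': has_geo_keywords,
--         'has_cat_keywords': has_cat_keywords,
--         'name_length': len(col_name)
--     }
-- ===== SOURCE B (Python) =====
-- # Position-scan rewrite: one left-to-right scan over the string collecting every
-- # keyword that matches at each position (startswith), then each flag is read off
-- # the found-set; replaces per-keyword substring searches.
-- _GROUPS = [
--     ('has_cost', ('cost', 'price', 'expense')),
--     ('has_revenue', ('revenue', 'income', 'profit')),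
--     ('has_id', ('id', 'code', 'uuid')),
--     ('has_date', ('date', 'time', 'year', 'month')),
--     ('has_ratio', ('rate', 'ratio', 'percent')),
--     ('has_score', ('score', 'rating', 'index')),
--     ('has_bound', ('low', 'high', 'mid', 'bound')),
--     ('has_reg', ('regression', 'coef', 'beta')),
--     ('is_unnamed', ('unnamed', 'col_')),
--     ('has_geo_keywords', ('region', 'country', 'city', 'state', 'location')),
--     ('has_cat_keywords', ('category', 'type', 'status', 'group', 'class')),
-- ]
-- _ALL_KEYWORDS = tuple(kw for _, kws in _GROUPS for kw in kws)
--
-- def extract_name_features(col_name):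
--     """Extracts binary features from column name."""
--     lo = col_name.lower()
--     found = set()
--     for i in range(len(lo)):
--         for kw in _ALL_KEYWORDS:
--             if kw not in found and lo.startswith(kw, i):
--                 found.add(kw)
--     feats = {key: (1 if any(kw in found for kw in kws) else 0)
--              for key, kws in _GROUPS}
--     feats['name_length'] = len(col_name)
--     return feats
-- ===== Notes on version B (the rewrite author's own statement) =====
-- stated objective: alternative
-- what changed: Replaces per-keyword substring searches with a single left-to-right position scan of the lowered string that collects matching keywords into a set via startswith, from which all flags are then read off.
import Mathlib
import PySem

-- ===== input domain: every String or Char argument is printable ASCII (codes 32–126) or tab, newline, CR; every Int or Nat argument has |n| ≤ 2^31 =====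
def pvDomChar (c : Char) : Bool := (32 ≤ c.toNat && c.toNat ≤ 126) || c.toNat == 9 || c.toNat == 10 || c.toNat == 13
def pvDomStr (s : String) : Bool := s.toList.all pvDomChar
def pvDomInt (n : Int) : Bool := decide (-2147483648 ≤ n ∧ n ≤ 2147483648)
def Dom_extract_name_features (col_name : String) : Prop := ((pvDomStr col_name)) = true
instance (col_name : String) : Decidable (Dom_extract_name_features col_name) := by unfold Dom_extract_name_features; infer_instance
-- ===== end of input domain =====

-- B replaces per-keyword substring searches by a single position scan collecting matched keywords into a set (objective: alternative).

-- ===== PORT A =====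
def extract_name_features (col_name : String) : List (String × Int) :=
  let name_lower := PySem.Str.lower col_name
  let geo_keywords := ["region", "country", "city", "state", "location"]
  let has_geo_keywords : Int := if geo_keywords.any (fun kw => PySem.Str.isIn kw name_lower) then 1 else 0
  let cat_keywords := ["category", "type", "status", "group", "class"]
  let has_cat_keywords : Int := if cat_keywords.any (fun kw => PySem.Str.isIn kw name_lower) then 1 else 0
  [("has_cost", if PySem.Str.isIn "cost" name_lower || PySem.Str.isIn "price" name_lower || PySem.Str.isIn "expense" name_lower then (1:Int) else 0),
   ("has_revenue", if PySem.Str.isIn "revenue" name_lower || PySem.Str.isIn "income" name_lower || PySem.Str.isIn "profit" name_lower then 1 else 0),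
   ("has_id", if PySem.Str.isIn "id" name_lower || PySem.Str.isIn "code" name_lower || PySem.Str.isIn "uuid" name_lower then 1 else 0),
   ("has_date", if PySem.Str.isIn "date" name_lower || PySem.Str.isIn "time" name_lower || PySem.Str.isIn "year" name_lower || PySem.Str.isIn "month" name_lower then 1 else 0),
   ("has_ratio", if PySem.Str.isIn "rate" name_lower || PySem.Str.isIn "ratio" name_lower || PySem.Str.isIn "percent" name_lower then 1 else 0),
   ("has_score", if PySem.Str.isIn "score" name_lower || PySem.Str.isIn "rating" name_lower || PySem.Str.isIn "index" name_lower then 1 else 0),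
   ("has_bound", if PySem.Str.isIn "low" name_lower || PySem.Str.isIn "high" name_lower || PySem.Str.isIn "mid" name_lower || PySem.Str.isIn "bound" name_lower then 1 else 0),
   ("has_reg", if PySem.Str.isIn "regression" name_lower || PySem.Str.isIn "coef" name_lower || PySem.Str.isIn "beta" name_lower then 1 else 0),
   ("is_unnamed", if PySem.Str.isIn "unnamed" name_lower || PySem.Str.isIn "col_" name_lower then 1 else 0),
   ("has_geo_keywords", has_geo_keywords),
   ("has_cat_keywords", has_cat_keywords),
   ("name_length", PySem.Str.len col_name)]

-- ===== PORT B =====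
-- B: one position scan over the lowered string; keywords matching at some position (startswith)
-- are collected into a set, all flags are then read off that set.
def pvGroups : List (String × List String) :=
  [("has_cost", ["cost", "price", "expense"]),
   ("has_revenue", ["revenue", "income", "profit"]),
   ("has_id", ["id", "code", "uuid"]),
   ("has_date", ["date", "time", "year", "month"]),
   ("has_ratio", ["rate", "ratio", "percent"]),
   ("has_score", ["score", "rating", "index"]),
   ("has_bound", ["low", "high", "mid", "bound"]),
   ("has_reg", ["regression", "coef", "beta"]),
   ("is_unnamed", ["unnamed", "col_"]),
   ("has_geo_keywords", ["region", "country", "city", "state", "location"]),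
   ("has_cat_keywords", ["category", "type", "status", "group", "class"])]

def pvAllKeywords : List String := pvGroups.flatMap (·.2)

def extract_name_features_alt (col_name : String) : List (String × Int) :=
  let lo := PySem.Str.lower col_name
  -- lo.startswith(kw, i) for 0 ≤ i is exactly: kw.toList is a prefix of lo.toList.drop i
  let found : PySem.Set String :=
    (List.range lo.toList.length).foldl (fun found i =>
      pvAllKeywords.foldl (fun found kw =>
        if !(PySem.Set.contains found kw) && PySem.Chars.startswith (lo.toList.drop i) kw.toList
        then PySem.Set.add found kw else found) found) []
  (pvGroups.map (fun g =>
      (g.1, if g.2.any (fun kw => PySem.Set.contains found kw) then (1:Int) else 0)))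
    ++ [("name_length", PySem.Str.len col_name)]

-- ===== PRECONDITION & SPEC =====
def Spec_extract_name_features (col_name : String) (out : List (String × Int)) : Prop := out = extract_name_features_alt col_name
instance (col_name : String) (out : List (String × Int)) : Decidable (Spec_extract_name_features col_name out) := by unfold Spec_extract_name_features; infer_instance

-- ===== CLAIM (what is proved, stated in full; the proofs are below) =====
def Claim_equal_extract_name_features : Prop := ∀ (col_name : String), Dom_extract_name_features col_name → Spec_extract_name_features col_name (extract_name_features col_name)

-- ===== LEMMAS AND PROOFS =====

-- membership after the inner keyword fold at position i
lemma pv_mem_inner (loL : List Char) (i : Nat) (ks : List String) (f : PySem.Set String) (kw : String) :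
    kw ∈ ks.foldl (fun f kw' =>
        if !(PySem.Set.contains f kw') && PySem.Chars.startswith (loL.drop i) kw'.toList
        then PySem.Set.add f kw' else f) f
    ↔ kw ∈ f ∨ (kw ∈ ks ∧ PySem.Chars.startswith (loL.drop i) kw.toList = true) := by
  induction ks generalizing f with
  | nil => simp
  | cons k ks ih =>
    simp only [List.foldl_cons, ih]
    by_cases hkk : kw = k
    · subst hkk
      by_cases hm : kw ∈ f
      · simp [hm]
      · by_cases hs : PySem.Chars.startswith (loL.drop i) kw.toList = true
        · simp [hm, hs]
        · simp [hm, hs]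
    · have hadd : ∀ s : PySem.Set String, kw ∈ PySem.Set.add s k ↔ kw ∈ s := by
        intro s; simp [PySem.Set.mem_add, hkk]
      by_cases hm : k ∈ f
      · simp [hm, hkk]
      · by_cases hs : PySem.Chars.startswith (loL.drop i) k.toList = true
        · simp [hm, hs, hkk]
        · simp [hm, hs, hkk]

-- membership after the outer position fold
lemma pv_mem_outer (loL : List Char) (is : List Nat) (f : PySem.Set String) (kw : String) :
    kw ∈ is.foldl (fun f i =>
        pvAllKeywords.foldl (fun f kw' =>
          if !(PySem.Set.contains f kw') && PySem.Chars.startswith (loL.drop i) kw'.toList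
          then PySem.Set.add f kw' else f) f) f
    ↔ kw ∈ f ∨ (kw ∈ pvAllKeywords ∧ ∃ i ∈ is, PySem.Chars.startswith (loL.drop i) kw.toList = true) := by
  induction is generalizing f with
  | nil => simp
  | cons j is ih =>
    simp only [List.foldl_cons, ih, pv_mem_inner]
    constructor
    · rintro ((h | ⟨h1, h2⟩) | ⟨h1, i, hi, h2⟩)
      · exact Or.inl h
      · exact Or.inr ⟨h1, j, by simp, h2⟩
      · exact Or.inr ⟨h1, i, by simp [hi], h2⟩
    · rintro (h | ⟨h1, i, hi, h2⟩)
      · exact Or.inl (Or.inl h)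
      · rcases List.mem_cons.mp hi with rfl | hi
        · exact Or.inl (Or.inr ⟨h1, h2⟩)
        · exact Or.inr ⟨h1, i, hi, h2⟩

-- the found-set test computes exactly Python's 'kw in lo'
lemma pv_found_iff (loL : List Char) (kw : String) (hkw : kw ∈ pvAllKeywords) (hne : kw.toList ≠ []) :
    PySem.Set.contains
      ((List.range loL.length).foldl (fun found i =>
        pvAllKeywords.foldl (fun found kw' =>
          if !(PySem.Set.contains found kw') && PySem.Chars.startswith (loL.drop i) kw'.toList
          then PySem.Set.add found kw' else found) found) []) kw
    = PySem.Chars.isIn kw.toList loL := by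
  rw [Bool.eq_iff_iff, PySem.Set.contains_iff, pv_mem_outer,
      ← PySem.Chars.exists_prefix_drop_iff_isIn]
  simp only [List.mem_nil_iff, false_or, List.mem_range, PySem.Chars.startswith_iff, hkw, true_and]
  constructor
  · rintro ⟨i, _, hp⟩; exact ⟨i, hp⟩
  · rintro ⟨j, hp⟩
    by_cases hj : j < loL.length
    · exact ⟨j, hj, hp⟩
    · exact absurd (List.prefix_nil.mp
        (by rwa [List.drop_eq_nil_of_le (le_of_not_gt hj)] at hp)) hne

-- ===== VERDICT (by name: the statement is the Claim_ definition above) =====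
theorem extract_name_features_spec : Claim_equal_extract_name_features := by
  intro col_name _
  unfold Spec_extract_name_features extract_name_features extract_name_features_alt
  simp only [pvGroups, List.map_cons, List.map_nil, List.any_cons, List.any_nil,
    List.cons_append, List.nil_append]
  simp only [pv_found_iff _ "cost" (by decide) (by decide), pv_found_iff _ "price" (by decide) (by decide),
      pv_found_iff _ "expense" (by decide) (by decide), pv_found_iff _ "revenue" (by decide) (by decide),
      pv_found_iff _ "income" (by decide) (by decide), pv_found_iff _ "profit" (by decide) (by decide),
      pv_found_iff _ "id" (by decide) (by decide), pv_found_iff _ "code" (by decide) (by decide),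
      pv_found_iff _ "uuid" (by decide) (by decide), pv_found_iff _ "date" (by decide) (by decide),
      pv_found_iff _ "time" (by decide) (by decide), pv_found_iff _ "year" (by decide) (by decide),
      pv_found_iff _ "month" (by decide) (by decide), pv_found_iff _ "rate" (by decide) (by decide),
      pv_found_iff _ "ratio" (by decide) (by decide), pv_found_iff _ "percent" (by decide) (by decide),
      pv_found_iff _ "score" (by decide) (by decide), pv_found_iff _ "rating" (by decide) (by decide),
      pv_found_iff _ "index" (by decide) (by decide), pv_found_iff _ "low" (by decide) (by decide),
      pv_found_iff _ "high" (by decide) (by decide), pv_found_iff _ "mid" (by decide) (by decide),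
      pv_found_iff _ "bound" (by decide) (by decide), pv_found_iff _ "regression" (by decide) (by decide),
      pv_found_iff _ "coef" (by decide) (by decide), pv_found_iff _ "beta" (by decide) (by decide),
      pv_found_iff _ "unnamed" (by decide) (by decide), pv_found_iff _ "col_" (by decide) (by decide),
      pv_found_iff _ "region" (by decide) (by decide), pv_found_iff _ "country" (by decide) (by decide),
      pv_found_iff _ "city" (by decide) (by decide), pv_found_iff _ "state" (by decide) (by decide),
      pv_found_iff _ "location" (by decide) (by decide), pv_found_iff _ "category" (by decide) (by decide),
      pv_found_iff _ "type" (by decide) (by decide), pv_found_iff _ "status" (by decide) (by decide),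
      pv_found_iff _ "class" (by decide) (by decide), pv_found_iff _ "group" (by decide) (by decide)]
  simp [Bool.or_assoc]
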